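-- pv_equiv track=rewrite | github.com/Charlotte-Knight/EFTScalingEquations | scripts/convert_to_common_format.py | removeIndentInLists
-- ===== SOURCE A (Python) =====
-- def removeIndentInLists(json_str):
--   new_str = ""
--   in_list = 0
--   for char in json_str:
--     if char == "[":
--       in_list += 1
--     elif char == "]":
--       in_list -= 1
--
--     if (char != "\n") or (in_list == 0):
--       new_str += char
--
--   return new_str
-- ===== SOURCE B (Python) =====
-- def removeIndentInLists(json_str):
--   # Line-structured algorithm: split into lines, then rejoin, re-inserting each
--   # newline only when the bracket depth at that line boundary is zero.
--   lines = json_str.split("\n")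
--   pieces = [lines[0]]
--   depth = lines[0].count("[") - lines[0].count("]")
--   for line in lines[1:]:
--     if depth == 0:
--       pieces.append("\n")
--     pieces.append(line)
--     depth += line.count("[") - line.count("]")
--   return "".join(pieces)
-- ===== Notes on version B (the rewrite author's own statement) =====
-- stated objective: faster
-- what changed: Replaces A's character-by-character stateful scan with quadratic string += by a line-structured algorithm: split on newlines, compute each line's bracket-count delta with str.count, and rejoin lines re-inserting a newline only at zero-depth boundaries.
import Mathlib
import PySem

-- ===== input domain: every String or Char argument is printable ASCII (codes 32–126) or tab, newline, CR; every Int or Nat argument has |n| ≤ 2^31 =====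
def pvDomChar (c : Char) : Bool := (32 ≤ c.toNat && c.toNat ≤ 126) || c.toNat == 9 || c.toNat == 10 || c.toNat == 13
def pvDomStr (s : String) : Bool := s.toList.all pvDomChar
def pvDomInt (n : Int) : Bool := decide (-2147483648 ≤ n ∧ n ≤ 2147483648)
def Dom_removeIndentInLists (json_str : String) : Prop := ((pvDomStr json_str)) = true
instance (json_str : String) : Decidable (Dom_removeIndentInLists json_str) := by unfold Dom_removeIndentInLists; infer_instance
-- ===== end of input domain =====

-- B replaces A's character-by-character stateful scan by a line-structured pass:
-- split on '\n', count brackets per line, rejoin inserting '\n' only at zero-depth boundaries.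

-- ===== PORT A =====
-- A's one stateful loop: update in_list, then conditionally append the char.
def removeIndentInLists (json_str : String) : String :=
  (json_str.toList.foldl
    (fun (st : List Char × Int) char =>
      let in_list : Int :=
        if char = '[' then st.2 + 1
        else if char = ']' then st.2 - 1
        else st.2
      (if char ≠ '\n' ∨ in_list = 0 then st.1 ++ [char] else st.1, in_list))
    ([], 0)).1 |> String.ofList

-- ===== PORT B =====
-- hand port of Python's str.split("\n") (always returns a nonempty list of pieces)
def pvSplitNL : List Char → List (List Char)
  | [] => [[]]
  | c :: cs =>
    match pvSplitNL cs with
    | [] => [[]]          -- unreachable: pvSplitNL is never []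
    | l :: ls => if c = '\n' then [] :: l :: ls else (c :: l) :: ls

-- line.count("[") - line.count("]")
def pvLineDelta (l : List Char) : Int := (l.count '[' : Int) - (l.count ']' : Int)

-- B's loop over lines[1:], carrying the depth at each boundary
def pvJoinRest : Int → List (List Char) → List Char
  | _, [] => []
  | d, l :: ls => (if d = 0 then ['\n'] else []) ++ l ++ pvJoinRest (d + pvLineDelta l) ls

def removeIndentInLists_alt (json_str : String) : String :=
  match pvSplitNL json_str.toList with
  | [] => ""             -- unreachable
  | l :: ls => String.ofList (l ++ pvJoinRest (pvLineDelta l) ls)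

-- ===== PRECONDITION & SPEC =====
def Spec_removeIndentInLists (json_str : String) (out : String) : Prop := out = removeIndentInLists_alt json_str
instance (json_str : String) (out : String) : Decidable (Spec_removeIndentInLists json_str out) := by unfold Spec_removeIndentInLists; infer_instance

-- ===== CLAIM (what is proved, stated in full; the proofs are below) =====
def Claim_equal_removeIndentInLists : Prop := ∀ (json_str : String), Dom_removeIndentInLists json_str → Spec_removeIndentInLists json_str (removeIndentInLists json_str)

-- ===== LEMMAS AND PROOFS =====
lemma pvSplitNL_ne_nil (cs : List Char) : pvSplitNL cs ≠ [] := by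
  cases cs with
  | nil => simp [pvSplitNL]
  | cons c cs =>
    simp only [pvSplitNL]
    cases pvSplitNL cs with
    | nil => simp
    | cons l ls => split_ifs <;> simp

lemma pvFold_eq_lines (cs : List Char) : ∀ (acc : List Char) (d : Int),
    (cs.foldl
      (fun (st : List Char × Int) char =>
        let in_list : Int :=
          if char = '[' then st.2 + 1
          else if char = ']' then st.2 - 1
          else st.2
        (if char ≠ '\n' ∨ in_list = 0 then st.1 ++ [char] else st.1, in_list))
      (acc, d)).1
    = acc ++ (match pvSplitNL cs with
              | [] => []
              | l :: ls => l ++ pvJoinRest (d + pvLineDelta l) ls) := by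
  induction cs with
  | nil => intro acc d; simp [pvSplitNL, pvJoinRest]
  | cons c cs ih =>
      intro acc d
      obtain ⟨l, ls, hls⟩ : ∃ l ls, pvSplitNL cs = l :: ls := by
        cases h : pvSplitNL cs with
        | nil => exact absurd h (pvSplitNL_ne_nil cs)
        | cons l ls => exact ⟨l, ls, rfl⟩
      by_cases hc : c = '\n'
      · subst hc
        have h1 : ('\n' : Char) ≠ '[' := by decide
        have h2 : ('\n' : Char) ≠ ']' := by decide
        by_cases hz : d = 0 <;>
          simp [List.foldl_cons, pvSplitNL, hls, ih, pvJoinRest, h1, h2, hz, show pvLineDelta [] = 0 from rfl]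
      · simp only [List.foldl_cons, pvSplitNL, hls, if_neg hc]
        have hk : (c ≠ '\n' ∨ (if c = '[' then d + 1 else if c = ']' then d - 1 else d) = 0) := Or.inl hc
        simp only [if_pos hk]
        rw [ih]
        simp only [hls]
        have hδ : d + pvLineDelta (c :: l) =
            (if c = '[' then d + 1 else if c = ']' then d - 1 else d) + pvLineDelta l := by
          simp only [pvLineDelta, List.count_cons]
          split_ifs with h1 h2 <;> simp_all <;> ring
        rw [hδ]
        simp

-- ===== VERDICT (by name: the statement is the Claim_ definition above) =====
theorem removeIndentInLists_spec : Claim_equal_removeIndentInLists := by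
  intro s _
  show _ = _
  unfold removeIndentInLists removeIndentInLists_alt
  rw [pvFold_eq_lines]
  obtain ⟨l, ls, hls⟩ : ∃ l ls, pvSplitNL s.toList = l :: ls := by
    cases h : pvSplitNL s.toList with
    | nil => exact absurd h (pvSplitNL_ne_nil s.toList)
    | cons l ls => exact ⟨l, ls, rfl⟩
  simp [hls]
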